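-- pv_equiv track=rewrite | github.com/AHCChan/Table_Tools | Tally_Column.py | Get_Keys_Order
-- ===== SOURCE A (Python) =====
-- class ORDER:
--     ALPHABETICAL=1
--     DESCENDING=2
--     NUMERICAL_ASCENDING=3
--     REVERSED_ALPHABETICAL=4
--     ORIGINAL=5
--
-- def Get_Keys_Order(data, order):
--     """
--     Return the keys of the dictionary in the order indicated by [order].
--
--     @data
--             (dict<str:int/float>)
--             The data. The keys are the strings being tallied, while the values
--             (of this dictionary) are the counts/count-values of those strings.
--     @order
--             (int) - Pseudo ENUM
--             How the results should be ordered. Acceptable options are: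
--                 1:  Alphabetical (A-Z)
--                 2:  Reversed alphabetical (Z-A)
--                 3:  Ascending numerical order
--                 4:  Descending numerical order
--
--     Get_Keys_Order(dict, int) -> list<str>
--     """
--     keys = data.keys()
--     if order == ORDER.ALPHABETICAL:
--         keys = sorted(keys)
--         return keys
--     elif order == ORDER.REVERSED_ALPHABETICAL:
--         keys = sorted(keys, reverse=True)
--         return keys
--     else:
--         temp = {}
--         keys = data.keys()
--         # First sort numerically
--         for k in keys:
--             count = data[k]
--             if count in temp:
--                 temp[count].append(k)
--             else:
--                 temp[count] = [k]
--         # Finalize while sorting sublists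
--         result = []
--         keys = temp.keys()
--         if order == ORDER.DESCENDING:
--             keys = sorted(keys, reverse=True)
--         elif order == ORDER.NUMERICAL_ASCENDING:
--             keys = sorted(keys)
--         for k in keys:
--             values = temp[k]
--             values = sorted(values)
--             for v in values:
--                 result.append(v)
--         # Return
--         return result
-- ===== SOURCE B (Python) =====
-- def Get_Keys_Order(data, order):
--     keys = list(data.keys())
--     if order == 1:
--         return sorted(keys)
--     if order == 4:
--         return sorted(keys, reverse=True)
--     if order == 2:
--         return sorted(keys, key=lambda k: (-data[k], k))
--     if order == 3:
--         return sorted(keys, key=lambda k: (data[k], k))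
--     groups = {}
--     for k in keys:
--         groups.setdefault(data[k], []).append(k)
--     return [k for g in groups.values() for k in sorted(g)]
-- ===== Notes on version B (the rewrite author's own statement) =====
-- stated objective: simpler
-- what changed: For the two numeric orders B replaces A's count-bucket dict plus per-bucket alphabetical sorts by a single composite-key sort (key=(count,k) resp. (-count,k)); only the fall-through/ORIGINAL branch still groups by count (via setdefault and a comprehension) to reproduce first-seen count order.
import Mathlib
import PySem

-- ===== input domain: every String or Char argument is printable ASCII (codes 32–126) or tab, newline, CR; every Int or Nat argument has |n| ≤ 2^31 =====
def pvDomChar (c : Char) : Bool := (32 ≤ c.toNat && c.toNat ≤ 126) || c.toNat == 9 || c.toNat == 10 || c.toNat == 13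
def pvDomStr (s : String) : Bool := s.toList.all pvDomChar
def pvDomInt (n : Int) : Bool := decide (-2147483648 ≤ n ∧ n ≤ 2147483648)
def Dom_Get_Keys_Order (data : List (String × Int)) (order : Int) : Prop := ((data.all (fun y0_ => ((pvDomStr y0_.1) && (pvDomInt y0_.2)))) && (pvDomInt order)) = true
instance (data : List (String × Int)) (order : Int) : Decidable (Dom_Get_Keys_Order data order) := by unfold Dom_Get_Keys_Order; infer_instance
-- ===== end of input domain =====

-- B replaces A's count-bucket dict + per-bucket sorts (for the two numeric orders) by one
-- composite-key sort over the keys; objective: simpler.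

-- ===== PORT A =====
-- the dict argument is received as an association list; Python's dict construction
-- (first insertion position, last value wins) is recovered by folding Dict.insert
def Get_Keys_Order (data : List (String × Int)) (order : Int) : List String :=
  let d : PySem.Dict String Int := data.foldl (fun d p => d.insert p.1 p.2) PySem.Dict.empty
  let keys := d.keys
  if order == 1 then
    PySem.List.sorted keys (fun k => k) false
  else if order == 4 then
    PySem.List.sorted keys (fun k => k) true
  else
    -- for k in keys: count = data[k]; if count in temp: temp[count].append(k) else temp[count] = [k]
    let temp : PySem.Dict Int (List String) :=
      keys.foldl (fun t k =>
        if t.contains (d.getD k 0) then t.modify (d.getD k 0) [] (fun g => g ++ [k])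
        else t.insert (d.getD k 0) [k]) PySem.Dict.empty
    let ckeys := temp.keys
    let ckeys := if order == 2 then PySem.List.sorted ckeys (fun c => c) true
      else if order == 3 then PySem.List.sorted ckeys (fun c => c) false
      else ckeys
    -- for k in ckeys: values = sorted(temp[k]); for v in values: result.append(v)
    ckeys.foldl (fun result c =>
      (PySem.List.sorted (temp.getD c []) (fun v => v) false).foldl
        (fun result v => result ++ [v]) result) []

-- ===== PORT B =====
def Get_Keys_Order_alt (data : List (String × Int)) (order : Int) : List String :=
  let d : PySem.Dict String Int := data.foldl (fun d p => d.insert p.1 p.2) PySem.Dict.empty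
  let keys := d.keys
  if order == 1 then
    PySem.List.sorted keys (fun k => k) false
  else if order == 4 then
    PySem.List.sorted keys (fun k => k) true
  else if order == 2 then
    -- sorted(keys, key=lambda k: (-data[k], k))
    PySem.List.sorted2 keys (fun k => -(d.getD k 0)) (fun k => k) false
  else if order == 3 then
    -- sorted(keys, key=lambda k: (data[k], k))
    PySem.List.sorted2 keys (fun k => d.getD k 0) (fun k => k) false
  else
    -- groups.setdefault(data[k], []).append(k): modify with default []
    let groups : PySem.Dict Int (List String) :=
      keys.foldl (fun t k => t.modify (d.getD k 0) [] (fun g => g ++ [k])) PySem.Dict.empty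
    -- [k for g in groups.values() for k in sorted(g)]
    groups.values.flatMap (fun g => PySem.List.sorted g (fun v => v) false)

-- ===== PRECONDITION & SPEC =====
def Spec_Get_Keys_Order (data : List (String × Int)) (order : Int) (out : List String) : Prop := out = Get_Keys_Order_alt data order
instance (data : List (String × Int)) (order : Int) (out : List String) : Decidable (Spec_Get_Keys_Order data order out) := by unfold Spec_Get_Keys_Order; infer_instance

-- ===== CLAIM (what is proved, stated in full; the proofs are below) =====
def Claim_equal_Get_Keys_Order : Prop := ∀ (data : List (String × Int)) (order : Int), Dom_Get_Keys_Order data order → Spec_Get_Keys_Order data order (Get_Keys_Order data order)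

-- ===== LEMMAS AND PROOFS =====

-- the bucket dict both else-branches build: count ↦ its keys in data order, counts in first-seen order
def pvBuckets (l : List String) (f : String → Int) : PySem.Dict Int (List String) :=
  l.foldl (fun t k => t.modify (f k) [] (fun g => g ++ [k])) PySem.Dict.empty

lemma pvBuckets_getD (l : List String) (f : String → Int) (c : Int) :
    (pvBuckets l f).getD c [] = l.filter (fun k => f k == c) := by
  unfold pvBuckets
  rw [show l.foldl (fun t k => t.modify (f k) [] (fun g => g ++ [k])) PySem.Dict.empty
      = (l.map (fun k => (f k, k))).foldl (fun t p => t.modify p.1 [] (fun g => g ++ [p.2])) PySem.Dict.empty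
    from (List.foldl_map (f := fun k => (f k, k))
      (g := fun t p => t.modify p.1 [] (fun g => g ++ [p.2])) (l := l) (init := PySem.Dict.empty)).symm]
  rw [PySem.Dict.getD_foldl_modify_append]
  simp [List.filter_map, Function.comp_def, PySem.Dict.getD, PySem.Dict.get?, PySem.Dict.empty]

lemma pvBuckets_keys (l : List String) (f : String → Int) :
    (pvBuckets l f).keys = PySem.Set.ofList (l.map f) := by
  unfold pvBuckets
  rw [PySem.Dict.keys_foldl_modify_key l f [] (fun _ k g => g ++ [k])]
  simp [PySem.Set.update, PySem.Set.ofList_eq_foldl, PySem.Dict.empty, PySem.Dict.keys]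

lemma pvBuckets_keys_nodup (l : List String) (f : String → Int) :
    (pvBuckets l f).keys.Nodup := by
  unfold pvBuckets
  apply PySem.Dict.nodup_keys_foldl_modify_key
  simp [PySem.Dict.empty, PySem.Dict.keys]

-- A's if-contains/else-insert bucket loop is the modify-with-default loop
lemma pvTempA_eq_pvBuckets (l : List String) (f : String → Int) :
    l.foldl (fun t k =>
        if t.contains (f k) then t.modify (f k) [] (fun g => g ++ [k])
        else t.insert (f k) [k]) PySem.Dict.empty = pvBuckets l f := by
  unfold pvBuckets
  apply PySem.List.foldl_congr_mem
  intro t k _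
  by_cases h : t.contains (f k) = true
  · simp [h]
  · simp only [h, if_false, Bool.false_eq_true]
    rw [PySem.Dict.modify]
    congr 1
    simp only [PySem.Dict.contains, List.any_eq_true, not_exists] at h
    have hf : List.find? (fun p => p.1 == f k) t.items = none :=
      List.find?_eq_none.mpr (fun p hp => by
        intro hc; exact (h p) ⟨hp, hc⟩)
    simp [PySem.Dict.getD, PySem.Dict.get?, hf]

-- sorted with a tuple key is sorted with the lexicographic key
lemma pvSorted2_eq_sorted_lex (xs : List String) (k1 : String → Int) :
    PySem.List.sorted2 xs k1 (fun k => k) false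
      = PySem.List.sorted xs (fun x => toLex (k1 x, x)) false := by
  unfold PySem.List.sorted2 PySem.List.sorted
  simp only [if_neg (by simp : ¬(false = true))]
  have hbe : (fun (a b : String) => decide (k1 a < k1 b) || (!decide (k1 b < k1 a) && decide (a < b)))
      = (fun (a b : String) => decide (toLex (k1 a, a) < toLex (k1 b, b))) := by
    funext a b
    rcases lt_trichotomy (k1 a) (k1 b) with h|h|h
    · simp [Prod.Lex.lt_iff, h]
    · simp [Prod.Lex.lt_iff, h]
    · simp [Prod.Lex.lt_iff, h, lt_asymm h, ne_of_gt h]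
  rw [hbe]

-- concatenating the per-count filters over the distinct counts is a permutation of the list
lemma pvFlatMap_filter_perm (S : List Int) (l : List String) (f : String → Int)
    (hS : S.Nodup) (hcov : ∀ x ∈ l, f x ∈ S) :
    (S.flatMap (fun c => l.filter (fun x => f x == c))).Perm l := by
  induction S generalizing l with
  | nil =>
    have hl : l = [] := by
      cases l with
      | nil => rfl
      | cons x xs => exact absurd (hcov x (by simp)) (by simp)
    simp [hl]
  | cons c S ih =>
    rw [List.flatMap_cons]
    have hcS : c ∉ S := (List.nodup_cons.mp hS).1
    have hrest : ∀ c' ∈ S, l.filter (fun x => f x == c')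
        = (l.filter (fun x => !(f x == c))).filter (fun x => f x == c') := by
      intro c' hc'
      rw [List.filter_filter]
      apply List.filter_congr
      intro x _
      by_cases hx : f x = c'
      · have hne : ¬ c' = c := by rintro rfl; exact hcS hc'
        simp [hx, hne]
      · simp [hx]
    rw [List.flatMap_congr (fun c' hc' => hrest c' hc')]
    have hperm := ih (l.filter (fun x => !(f x == c))) (List.Nodup.of_cons hS)
      (by
        intro x hx
        rcases List.mem_filter.mp hx with ⟨hxl, hxc⟩
        rcases List.mem_cons.mp (hcov x hxl) with h | h
        · simp [h] at hxc
        · exact h)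
    exact (List.Perm.append_left _ hperm).trans (List.filter_append_perm _ l)

-- an alphabetical sort of keys drawn from a Nodup list is strictly increasing
lemma pvSorted_filter_pairwise_lt (l : List String) (hnd : l.Nodup) (p : String → Bool) :
    (PySem.List.sorted (l.filter p) (fun v => v) false).Pairwise (· < ·) := by
  have h1 := PySem.List.sorted_pairwise (l.filter p) (fun v => v)
  have h2 : (PySem.List.sorted (l.filter p) (fun v => v) false).Nodup :=
    (PySem.List.sorted_perm (l.filter p) (fun v => v) false).symm.nodup (hnd.filter p)
  exact (h1.and h2).imp (fun hab => lt_of_le_of_ne hab.1 hab.2)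

-- master lemma: the composite-key sort is exactly "counts in cs order, alphabetical inside a count"
lemma pvGrouped_core (l : List String) (f : String → Int) (hnd : l.Nodup)
    (g : Int → Int)
    (cs : List Int) (hcs : cs.Perm (PySem.Set.ofList (l.map f)))
    (hpw : cs.Pairwise (fun a b => g a < g b)) :
    PySem.List.sorted l (fun k => toLex (g (f k), k)) false
      = cs.flatMap (fun c => PySem.List.sorted (l.filter (fun k => f k == c)) (fun v => v) false) := by
  apply PySem.List.sorted_eq_of_perm_of_pairwise_lt
  · have h1 : (cs.flatMap (fun c => PySem.List.sorted (l.filter (fun k => f k == c)) (fun v => v) false)).Perm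
        (cs.flatMap (fun c => l.filter (fun k => f k == c))) :=
      List.Perm.flatMap_left _ (fun c _ => PySem.List.sorted_perm _ _ _)
    have h2 : (cs.flatMap (fun c => l.filter (fun k => f k == c))).Perm
        ((PySem.Set.ofList (l.map f)).flatMap (fun c => l.filter (fun k => f k == c))) :=
      hcs.flatMap_right _
    refine h1.trans (h2.trans ?_)
    apply pvFlatMap_filter_perm
    · exact PySem.Set.nodup_ofList _
    · intro x hx
      exact (PySem.Set.mem_ofList _ _).mpr (List.mem_map_of_mem hx)
  · rw [List.pairwise_flatMap]
    have hmemf : ∀ c, ∀ x ∈ PySem.List.sorted (l.filter (fun k => f k == c)) (fun v => v) false, f x = c := by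
      intro c x hx
      have := List.mem_filter.mp ((PySem.List.mem_sorted _ _ _ _).mp hx)
      simpa using this.2
    constructor
    · intro c _
      apply (pvSorted_filter_pairwise_lt l hnd _).imp_of_mem
      intro a b ha hb hab
      exact Prod.Lex.lt_iff.mpr (Or.inr ⟨by simp [hmemf c a ha, hmemf c b hb], hab⟩)
    · apply hpw.imp
      intro a b hab x hx y hy
      exact Prod.Lex.lt_iff.mpr (Or.inl (by rw [hmemf a x hx, hmemf b y hy]; exact hab))

-- the composite-key ascending sort: counts ascending, alphabetical inside a count
lemma pvGrouped_asc (l : List String) (f : String → Int) (hnd : l.Nodup) :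
    PySem.List.sorted l (fun k => toLex (f k, k)) false
      = (PySem.List.sorted (PySem.Set.ofList (l.map f)) (fun c => c) false).flatMap
          (fun c => PySem.List.sorted (l.filter (fun k => f k == c)) (fun v => v) false) :=
  pvGrouped_core l f hnd (fun c => c)
    (PySem.List.sorted (PySem.Set.ofList (l.map f)) (fun c => c) false)
    (PySem.List.sorted_perm _ _ _)
    (PySem.List.sorted_ofList_pairwise_lt _)

-- the composite-key (-count, key) sort: counts descending, alphabetical inside a count
lemma pvGrouped_desc (l : List String) (f : String → Int) (hnd : l.Nodup) :
    PySem.List.sorted l (fun k => toLex (-(f k), k)) false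
      = (PySem.List.sorted (PySem.Set.ofList (l.map f)) (fun c => c) true).flatMap
          (fun c => PySem.List.sorted (l.filter (fun k => f k == c)) (fun v => v) false) := by
  apply pvGrouped_core l f hnd (fun c => -c)
    (PySem.List.sorted (PySem.Set.ofList (l.map f)) (fun c => c) true)
    (PySem.List.sorted_perm _ _ _)
  have h1 := PySem.List.sorted_pairwise_rev (PySem.Set.ofList (l.map f)) (fun c => c)
  have h2 : (PySem.List.sorted (PySem.Set.ofList (l.map f)) (fun c => c) true).Nodup :=
    (PySem.List.sorted_perm _ _ _).symm.nodup (PySem.Set.nodup_ofList _)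
  exact (h1.and h2).imp (fun hab => neg_lt_neg (lt_of_le_of_ne hab.1 (Ne.symm hab.2)))

-- keys of the dict built from the association list are distinct
lemma pvKeys_nodup (data : List (String × Int)) :
    (data.foldl (fun d p => d.insert p.1 p.2) PySem.Dict.empty).keys.Nodup :=
  PySem.Dict.nodup_keys_foldl_insert_key data (fun p => p.1) (fun _ p => p.2) PySem.Dict.empty
    (by simp [PySem.Dict.empty, PySem.Dict.keys])

-- ===== VERDICT (by name: the statement is the Claim_ definition above) =====
theorem Get_Keys_Order_spec : Claim_equal_Get_Keys_Order := by
  intro data order _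
  unfold Spec_Get_Keys_Order Get_Keys_Order Get_Keys_Order_alt
  simp only []
  set d : PySem.Dict String Int := data.foldl (fun d p => d.insert p.1 p.2) PySem.Dict.empty with hd
  have hnd : d.keys.Nodup := hd ▸ pvKeys_nodup data
  by_cases h1 : (order == 1) = true
  · simp only [h1, if_true]
  · simp only [h1, Bool.false_eq_true, if_false]
    by_cases h4 : (order == 4) = true
    · simp only [h4, if_true]
    · simp only [h4, Bool.false_eq_true, if_false]
      rw [pvTempA_eq_pvBuckets d.keys (fun k => d.getD k 0)]
      by_cases h2 : (order == 2) = true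
      · simp only [h2, if_true]
        simp only [PySem.List.foldl_append_singleton_eq_self, PySem.List.foldl_append_eq_flatMap,
          List.nil_append]
        rw [pvSorted2_eq_sorted_lex d.keys (fun k => -(d.getD k 0)),
          pvGrouped_desc d.keys (fun k => d.getD k 0) hnd, pvBuckets_keys]
        apply List.flatMap_congr
        intro c _
        rw [pvBuckets_getD]
      · simp only [h2, Bool.false_eq_true, if_false]
        by_cases h3 : (order == 3) = true
        · simp only [h3, if_true]
          simp only [PySem.List.foldl_append_singleton_eq_self, PySem.List.foldl_append_eq_flatMap,
            List.nil_append]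
          rw [pvSorted2_eq_sorted_lex d.keys (fun k => d.getD k 0),
            pvGrouped_asc d.keys (fun k => d.getD k 0) hnd, pvBuckets_keys]
          apply List.flatMap_congr
          intro c _
          rw [pvBuckets_getD]
        · simp only [h3, Bool.false_eq_true, if_false]
          simp only [PySem.List.foldl_append_singleton_eq_self, PySem.List.foldl_append_eq_flatMap,
            List.nil_append]
          rw [show d.keys.foldl (fun t k => t.modify (d.getD k 0) [] (fun g => g ++ [k])) PySem.Dict.empty
              = pvBuckets d.keys (fun k => d.getD k 0) from rfl]
          rw [PySem.Dict.values_eq_map_keys _ (pvBuckets_keys_nodup _ _) []]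
          rw [List.flatMap_map]
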